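-- pv_equiv track=rewrite | github.com/RemiErr/2026-python | weeks/week-07/solutions/1111405012/question-10062-su.py | solve
-- ===== SOURCE A (Python) =====
-- class Fenwick:
--     def __init__(self, n: int) -> None:
--         self.n = n
--         self.bit = [0] * (n + 1)
--
--     def add(self, i: int, value: int) -> None:
--         while i <= self.n:
--             self.bit[i] += value
--             i += i & -i
--
--     def pick_kth(self, k: int) -> int:
--         i = 0
--         step = 1 << (self.n.bit_length() - 1)
--         while step:
--             nxt = i + step
--             if nxt <= self.n and self.bit[nxt] < k:
--                 k -= self.bit[nxt]
--                 i = nxt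
--             step >>= 1
--         return i + 1
--
-- def solve(data: str) -> str:
--     parts = data.split()
--     if not parts:
--         return ""
--     n = int(parts[0])
--     before = [0] + [int(x) for x in parts[1:1 + max(0, n - 1)]]
--     tree = Fenwick(n)
--     for number in range(1, n + 1):
--         tree.add(number, 1)
--     answer = [0] * n
--     for pos in range(n - 1, -1, -1):
--         answer[pos] = tree.pick_kth(before[pos] + 1)
--         tree.add(answer[pos], -1)
--     return "\n".join(str(x) for x in answer)
-- ===== SOURCE B (Python) =====
-- def solve(data: str) -> str:
--     parts = data.split()
--     if not parts:
--         return ""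
--     n = int(parts[0])
--     before = [0] + [int(x) for x in parts[1:1 + max(0, n - 1)]]
--     available = list(range(1, n + 1))
--     answer = [0] * n
--     for pos in range(n - 1, -1, -1):
--         answer[pos] = available.pop(before[pos])
--     return "\n".join(str(x) for x in answer)
-- ===== Notes on version B (the rewrite author's own statement) =====
-- stated objective: simpler
-- what changed: Replaces the Fenwick (binary indexed) tree and its bit-trick order-statistic descent by a plain sorted list of the still-unused numbers from which answer[pos] = available.pop(before[pos]) is taken directly, dropping the Fenwick class entirely.
-- outside the precondition, e.g. on solve('3 5 0'): A returns '2\n4\n1', B raises IndexError; on solve('3 -1 0'): A returns '3\n1\n1', B returns '2\n3\n1'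
import Mathlib
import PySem

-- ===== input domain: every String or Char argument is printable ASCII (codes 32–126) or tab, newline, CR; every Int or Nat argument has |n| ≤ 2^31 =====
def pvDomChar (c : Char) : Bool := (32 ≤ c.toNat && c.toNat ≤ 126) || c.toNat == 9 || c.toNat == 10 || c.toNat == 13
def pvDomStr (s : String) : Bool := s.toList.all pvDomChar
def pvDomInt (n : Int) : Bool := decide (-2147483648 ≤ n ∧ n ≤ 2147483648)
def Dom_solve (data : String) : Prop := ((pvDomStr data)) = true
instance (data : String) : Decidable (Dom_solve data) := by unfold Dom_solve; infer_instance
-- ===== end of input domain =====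

-- B replaces A's Fenwick (binary indexed) tree by the plain sorted list of still-unused
-- numbers, popping the before[pos]-th element directly (objective: simpler).

-- ===== PORT A =====
-- Fenwick.add: 'while i <= n: bit[i] += value; i += i & -i'.  The while loop is ported
-- with a fuel counter; the callers pass fuel (n + 1 - i).toNat, an upper bound on the
-- number of iterations (i increases by at least 1 per step on every reachable call).
def fenAdd (n : Int) (bit : List Int) (i v : Int) (fuel : Nat) : List Int :=
  match fuel with
  | 0 => bit
  | fuel + 1 =>
    if i ≤ n then
      fenAdd n (PySem.List.pySetD bit i (PySem.List.pyGetD bit i 0 + v))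
        (i + PySem.Int.band i (-i)) v fuel
    else bit

-- Fenwick.pick_kth's 'while step: ... step >>= 1' loop; fuel = bit_length(n) + 1 bounds
-- the number of halvings of step exactly.
def fenPickLoop (n : Int) (bit : List Int) (i k step : Int) (fuel : Nat) : Int :=
  match fuel with
  | 0 => i
  | fuel + 1 =>
    if step ≠ 0 then
      let nxt := i + step
      if nxt ≤ n ∧ PySem.List.pyGetD bit nxt 0 < k then
        fenPickLoop n bit nxt (k - PySem.List.pyGetD bit nxt 0) (step >>> (1 : Nat)) fuel
      else fenPickLoop n bit i k (step >>> (1 : Nat)) fuel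
    else i

-- 'step = 1 << (n.bit_length() - 1)': pick_kth is only reached with n ≥ 1, where
-- bit_length(n) ≥ 1 (Python raises on a negative shift, unreachable under Pre_).
def fenPick (n : Int) (bit : List Int) (k : Int) : Int :=
  fenPickLoop n bit 0 k ((1 : Int) <<< (PySem.Int.bitLength n - 1)) (PySem.Int.bitLength n + 1) + 1

-- int(x) is total under Pre_ (parse failures are excluded there, Python raises ValueError);
-- likewise before[pos] is in range under Pre_.
def solve (data : String) : String :=
  let parts := PySem.Str.split₀ data
  if parts = [] then "" else
  let n := (PySem.Int.ofStr? (parts.getD 0 "")).getD 0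
  let before := 0 :: (PySem.List.slice parts (some 1) (some (1 + max 0 (n - 1)))).map
      (fun x => (PySem.Int.ofStr? x).getD 0)
  let bit0 : List Int := List.replicate (n + 1).toNat 0
  let bit1 := (PySem.List.pyRange 1 (n + 1) 1).foldl
      (fun b number => fenAdd n b number 1 (n + 1 - number).toNat) bit0
  let fin := (PySem.List.pyRange (n - 1) (-1) (-1)).foldl
      (fun (s : List Int × List Int) pos =>
        let a := fenPick n s.1 (PySem.List.pyGetD before pos 0 + 1)
        (fenAdd n s.1 a (-1) (n + 1 - a).toNat, PySem.List.pySetD s.2 pos a))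
      (bit1, List.replicate n.toNat 0)
  PySem.Str.join "\n" (fin.2.map PySem.Int.toStr)

-- ===== PORT B =====
-- available.pop(before[pos]): out-of-range pop (Python IndexError) is excluded by Pre_;
-- the none branch keeps the state unchanged there.
def solve_alt (data : String) : String :=
  let parts := PySem.Str.split₀ data
  if parts = [] then "" else
  let n := (PySem.Int.ofStr? (parts.getD 0 "")).getD 0
  let before := 0 :: (PySem.List.slice parts (some 1) (some (1 + max 0 (n - 1)))).map
      (fun x => (PySem.Int.ofStr? x).getD 0)
  let fin := (PySem.List.pyRange (n - 1) (-1) (-1)).foldl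
      (fun (s : List Int × List Int) pos =>
        match PySem.List.pop? s.1 (PySem.List.pyGetD before pos 0) with
        | some (a, rest) => (rest, PySem.List.pySetD s.2 pos a)
        | none => s)
      (PySem.List.pyRange 1 (n + 1) 1, List.replicate n.toNat 0)
  PySem.Str.join "\n" (fin.2.map PySem.Int.toStr)

-- ===== PRECONDITION & SPEC =====
-- Pre_ excludes malformed input: unparsable tokens (A raises ValueError), fewer than n
-- whitespace-separated tokens (A raises IndexError), and inversion counts outside
-- [0, pos] — there A silently returns a list that is not a permutation while B raises
-- IndexError or, for negative counts, pops from the end; both are meaningless for the task.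
def Pre_solve (data : String) : Prop :=
  let parts := PySem.Str.split₀ data
  parts ≠ [] →
    ((PySem.Int.ofStr? (parts.getD 0 "")).isSome ∧
     (1 ≤ (PySem.Int.ofStr? (parts.getD 0 "")).getD 0 →
        (PySem.Int.ofStr? (parts.getD 0 "")).getD 0 ≤ (parts.length : Int) ∧
        ∀ i : Nat, i < ((PySem.Int.ofStr? (parts.getD 0 "")).getD 0 - 1).toNat →
          (PySem.Int.ofStr? (parts.getD (i + 1) "")).isSome ∧
          0 ≤ (PySem.Int.ofStr? (parts.getD (i + 1) "")).getD 0 ∧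
          (PySem.Int.ofStr? (parts.getD (i + 1) "")).getD 0 ≤ (i : Int) + 1))

instance (data : String) : Decidable (Pre_solve data) := by unfold Pre_solve; infer_instance

def pvWitness_solve : String := "4 1 0 3"

def Spec_solve (data : String) (out : String) : Prop := out = solve_alt data
instance (data : String) (out : String) : Decidable (Spec_solve data out) := by unfold Spec_solve; infer_instance

-- ===== CLAIM (what is proved, stated in full; the proofs are below) =====
def Claim_equal_solve : Prop := ∀ (data : String), Dom_solve data → Pre_solve data → Spec_solve data (solve data)

-- ===== LEMMAS AND PROOFS =====

-- lowb m is the lowest set bit of m (Python's  m & -m  for m > 0)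
def lowb (m : Nat) : Nat :=
  if m = 0 then 0 else if m % 2 = 1 then 1 else 2 * lowb (m / 2)
decreasing_by omega

theorem lowb_zero : lowb 0 = 0 := by simp [lowb]
theorem lowb_odd {m : Nat} (h : m % 2 = 1) : lowb m = 1 := by
  rw [lowb]; simp [h]; omega
theorem lowb_even {m : Nat} (h0 : m ≠ 0) (h : m % 2 = 0) : lowb m = 2 * lowb (m / 2) := by
  rw [lowb]; simp [h0, h]
theorem lowb_two_mul {q : Nat} (h : 0 < q) : lowb (2 * q) = 2 * lowb q := by
  rw [lowb_even (by omega) (by omega)]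
  have hq : 2 * q / 2 = q := by omega
  rw [hq]

theorem lowb_pos : ∀ m : Nat, 0 < m → 0 < lowb m := by
  intro m
  induction m using Nat.strong_induction_on with
  | _ m ih =>
    intro h
    rcases Nat.even_or_odd m with he | ho
    · have hm2 : m % 2 = 0 := Nat.even_iff.mp he
      rw [lowb_even (by omega) hm2]
      have := ih (m / 2) (by omega) (by omega)
      omega
    · rw [lowb_odd (Nat.odd_iff.mp ho)]; omega

theorem lowb_le : ∀ m : Nat, 0 < m → lowb m ≤ m := by
  intro m
  induction m using Nat.strong_induction_on with
  | _ m ih =>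
    intro h
    rcases Nat.even_or_odd m with he | ho
    · have hm2 : m % 2 = 0 := Nat.even_iff.mp he
      rw [lowb_even (by omega) hm2]
      have := ih (m / 2) (by omega) (by omega)
      omega
    · rw [lowb_odd (Nat.odd_iff.mp ho)]; omega

theorem land_eo (a b : Nat) : (2 * a) &&& (2 * b + 1) = 2 * (a &&& b) := by
  have := Nat.land_bit false a true b
  simpa [Nat.bit] using this
theorem land_oe (a b : Nat) : (2 * a + 1) &&& (2 * b) = 2 * (a &&& b) := by
  have := Nat.land_bit true a false b
  simpa [Nat.bit] using this

theorem land_pred : ∀ m : Nat, 0 < m → m &&& (m - 1) = m - lowb m := by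
  intro m
  induction m using Nat.strong_induction_on with
  | _ m ih =>
    intro h
    rcases Nat.even_or_odd m with he | ho
    · obtain ⟨q, hq⟩ := he
      have hq0 : 0 < q := by omega
      have h2 : m - 1 = 2 * (q - 1) + 1 := by omega
      have h1 : m = 2 * q := by omega
      rw [h2, h1, land_eo, lowb_two_mul hq0]
      have h3 := ih q (by omega) hq0
      have hle := lowb_le q hq0
      have hpos := lowb_pos q hq0
      omega
    · have h1 : m % 2 = 1 := Nat.odd_iff.mp ho
      obtain ⟨q, hq⟩ := ho
      have h2 : m - 1 = 2 * q := by omega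
      rw [h2, hq, lowb_odd (by omega), land_oe]
      simp [Nat.and_self]

theorem band_neg_self (m : Nat) (h : 0 < m) :
    PySem.Int.band (m : Int) (-(m : Int)) = (lowb m : Int) := by
  have hle := lowb_le m h
  rw [PySem.Int.band]
  rw [if_pos (by positivity), if_neg (by omega)]
  rw [show (-(-(m:Int)) - 1).toNat = m - 1 by omega, Int.toNat_natCast]
  rw [land_pred m h]
  have := lowb_pos m h
  omega

theorem lowb_add_small : ∀ r : Nat, ∀ m : Nat, 0 < r → r < lowb m → lowb (m + r) = lowb r := by
  intro r
  induction r using Nat.strong_induction_on with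
  | _ r ih =>
    intro m hr hrm
    have hm0 : 0 < m := by
      by_contra hc
      have : m = 0 := by omega
      rw [this, lowb_zero] at hrm; omega
    rcases Nat.even_or_odd r with he | ho
    · have hr2 : r % 2 = 0 := Nat.even_iff.mp he
      -- lowb m > r ≥ 2 so m even
      have hm2 : m % 2 = 0 := by
        by_contra hc
        rw [lowb_odd (by omega)] at hrm; omega
      have hlm : lowb m = 2 * lowb (m / 2) := lowb_even (by omega) hm2
      have h1 : lowb (m + r) = 2 * lowb ((m + r) / 2) := lowb_even (by omega) (by omega)
      have h2 : (m + r) / 2 = m / 2 + r / 2 := by omega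
      have h3 := ih (r / 2) (by omega) (m / 2) (by omega) (by omega)
      rw [h1, h2, h3, lowb_even (by omega) hr2]
    · have hr1 : r % 2 = 1 := Nat.odd_iff.mp ho
      have hm2 : m % 2 = 0 := by
        by_contra hc
        rw [lowb_odd (by omega)] at hrm; omega
      rw [lowb_odd (by omega), lowb_odd hr1]

theorem lowb_pow (e : Nat) : lowb (2 ^ e) = 2 ^ e := by
  induction e with
  | zero => simp [lowb]
  | succ e ih =>
    rw [pow_succ, mul_comm, lowb_two_mul (by positivity), ih, mul_comm]

theorem pow_dvd_le_lowb : ∀ e m : Nat, 0 < m → 2 ^ e ∣ m → 2 ^ e ≤ lowb m := by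
  intro e
  induction e with
  | zero => intro m h _; simpa using lowb_pos m h
  | succ e ih =>
    intro m h hd
    obtain ⟨q, hq⟩ := hd
    have hq0 : 0 < q := by
      rcases Nat.eq_zero_or_pos q with h0 | h0
      · rw [h0, mul_zero] at hq; omega
      · exact h0
    have hm2 : m % 2 = 0 := by
      have : (2:Nat) ∣ m := ⟨2 ^ e * q, by rw [hq]; ring⟩
      omega
    have hhalf : m / 2 = 2 ^ e * q := by
      rw [hq, pow_succ]
      rw [show 2 ^ e * 2 * q = 2 * (2 ^ e * q) by ring]
      omega
    have h1 := ih (m / 2) (by rw [hhalf]; positivity) (by rw [hhalf]; exact Dvd.intro q rfl)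
    rw [lowb_even (by omega) hm2, pow_succ]
    omega

theorem lowb_add_pow (e i : Nat) (h : 2 ^ (e + 1) ∣ i) : lowb (i + 2 ^ e) = 2 ^ e := by
  rcases Nat.eq_zero_or_pos i with h0 | h0
  · rw [h0, zero_add, lowb_pow]
  · have h1 := pow_dvd_le_lowb (e + 1) i h0 h
    have h2 : (2:Nat) ^ e < 2 ^ (e + 1) := by
      rw [pow_succ]; have : (0:Nat) < 2 ^ e := by positivity
      omega
    rw [lowb_add_small (2 ^ e) i (by positivity) (by omega), lowb_pow]

theorem lowb_gap (i j : Nat) (h1 : 0 < i) (h2 : i < j) (h3 : j < i + lowb i) :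
    i ≤ j - lowb j := by
  have hr : j = i + (j - i) := by omega
  have h4 : lowb j = lowb (j - i) := by
    conv_lhs => rw [hr]
    exact lowb_add_small (j - i) i (by omega) (by omega)
  have h5 := lowb_le (j - i) (by omega)
  omega

theorem lowb_stepdown : ∀ i : Nat, 0 < i → (i + lowb i) - lowb (i + lowb i) ≤ i - lowb i := by
  intro i
  induction i using Nat.strong_induction_on with
  | _ i ih =>
    intro h
    rcases Nat.even_or_odd i with he | ho
    · have hi2 : i % 2 = 0 := Nat.even_iff.mp he
      have hL : lowb i = 2 * lowb (i / 2) := lowb_even (by omega) hi2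
      have hpos := lowb_pos (i / 2) (by omega)
      have hle := lowb_le (i / 2) (by omega)
      have hsum : i + lowb i = 2 * (i / 2 + lowb (i / 2)) := by omega
      have hL2 : lowb (i + lowb i) = 2 * lowb (i / 2 + lowb (i / 2)) := by
        rw [hsum, lowb_two_mul (by omega)]
      have hih := ih (i / 2) (by omega) (by omega)
      have hp2 := lowb_pos (i / 2 + lowb (i / 2)) (by omega)
      have hl2 := lowb_le (i / 2 + lowb (i / 2)) (by omega)
      omega
    · have hi1 : i % 2 = 1 := Nat.odd_iff.mp ho
      rw [lowb_odd hi1]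
      have hi2 : (i + 1) % 2 = 0 := by omega
      have hL : lowb (i + 1) = 2 * lowb ((i + 1) / 2) := lowb_even (by omega) hi2
      have := lowb_pos ((i + 1) / 2) (by omega)
      omega

def pref (c : Nat → Int) : Nat → Int
  | 0 => 0
  | m + 1 => pref c m + c (m + 1)

def updf (c : Nat → Int) (x : Nat) (v : Int) : Nat → Int := fun t => if t = x then c t + v else c t

def ideal (c : Nat → Int) (j : Nat) : Int := pref c j - pref c (j - lowb j)

theorem pref_upd (c : Nat → Int) (x : Nat) (v : Int) (hx : 1 ≤ x) :
    ∀ m, pref (updf c x v) m = pref c m + (if x ≤ m then v else 0) := by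
  intro m
  induction m with
  | zero => simp [pref]; omega
  | succ m ih =>
    simp only [pref, ih, updf]
    by_cases h1 : m + 1 = x
    · rw [if_neg (by omega), if_pos h1, if_pos (by omega)]; ring
    · rw [if_neg h1]
      by_cases h2 : x ≤ m
      · rw [if_pos h2, if_pos (by omega)]; ring
      · rw [if_neg h2, if_neg (by omega)]; ring


theorem ideal_upd (c : Nat → Int) (x : Nat) (v : Int) (hx : 1 ≤ x) (j : Nat) (hj : 1 ≤ j) :
    ideal (updf c x v) j = ideal c j + (if x ≤ j ∧ j - lowb j < x then v else 0) := by
  unfold ideal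
  rw [pref_upd c x v hx, pref_upd c x v hx]
  by_cases h1 : x ≤ j
  · rw [if_pos h1]
    by_cases h2 : j - lowb j < x
    · rw [if_neg (by omega), if_pos ⟨h1, h2⟩]; ring
    · rw [if_pos (by omega), if_neg (by simp; omega)]; ring
  · rw [if_neg h1, if_neg (by omega), if_neg (by simp; omega)]; ring

theorem getD_set (B : List Int) (i j : Nat) (w : Int) (hi : i < B.length) :
    (B.set i w).getD j 0 = if j = i then w else B.getD j 0 := by
  by_cases h : j = i
  · subst h; simp [List.getD, hi]
  · have h' : i ≠ j := by omega
    simp [List.getD, h']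
    intro he; exact absurd he h

theorem fenAdd_walk (n x : Nat) (hx : 1 ≤ x) (v : Int) (c : Nat → Int) :
    ∀ (fuel : Nat) (i : Nat) (B : List Int),
    1 ≤ i → x ≤ i → i - lowb i < x →
    B.length = n + 1 →
    (∀ j : Nat, 1 ≤ j → j ≤ n →
      B.getD j 0 = if x ≤ j ∧ j - lowb j < x ∧ j < i then ideal (updf c x v) j else ideal c j) →
    n + 1 - i ≤ fuel →
    ((fenAdd (n : Int) B (i : Int) v fuel).length = n + 1 ∧
     ∀ j : Nat, 1 ≤ j → j ≤ n →
       (fenAdd (n : Int) B (i : Int) v fuel).getD j 0 =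
         if x ≤ j ∧ j - lowb j < x then ideal (updf c x v) j else ideal c j) := by
  intro fuel
  induction fuel with
  | zero =>
    intro i B hi1 hxi hqi hlen hinv hfuel
    have hni : n < i := by omega
    refine ⟨by simpa [fenAdd] using hlen, ?_⟩
    intro j hj1 hj2
    rw [show fenAdd (n : Int) B (i : Int) v 0 = B from rfl, hinv j hj1 hj2]
    by_cases hq : x ≤ j ∧ j - lowb j < x
    · rw [if_pos ⟨hq.1, hq.2, by omega⟩, if_pos hq]
    · rw [if_neg (by tauto), if_neg hq]
  | succ fuel ih =>
    intro i B hi1 hxi hqi hlen hinv hfuel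
    by_cases hin : i ≤ n
    · rw [show fenAdd (n : Int) B (i : Int) v (fuel + 1)
          = fenAdd (n : Int) (PySem.List.pySetD B (i : Int) (PySem.List.pyGetD B (i : Int) 0 + v))
              ((i : Int) + PySem.Int.band (i : Int) (-(i : Int))) v fuel by
        rw [fenAdd]; rw [if_pos (by exact_mod_cast hin)]]
      rw [band_neg_self i (by omega)]
      rw [show (i : Int) + (lowb i : Int) = ((i + lowb i : Nat) : Int) by push_cast; ring]
      have hBi : PySem.List.pyGetD B (i : Int) 0 = ideal c i := by
        rw [PySem.List.pyGetD_natCast]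
        rw [hinv i (by omega) hin]
        rw [if_neg (by omega)]
      rw [PySem.List.pySetD_natCast, hBi]
      have hlbpos := lowb_pos i (by omega)
      have hstep := lowb_stepdown i (by omega)
      apply ih (i + lowb i)
      · omega
      · omega
      · omega
      · simp [hlen]
      · intro j hj1 hj2
        rw [getD_set B i j _ (by omega)]
        by_cases hji : j = i
        · subst hji
          rw [if_pos (show x ≤ j ∧ j - lowb j < x ∧ j < j + lowb j from ⟨hxi, hqi, by omega⟩)]
          rw [ideal_upd c x v hx j hj1]
          rw [if_pos (show x ≤ j ∧ j - lowb j < x from ⟨hxi, hqi⟩)]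
          simp
        · rw [if_neg hji, hinv j hj1 hj2]
          by_cases hlt : j < i
          · by_cases hq : x ≤ j ∧ j - lowb j < x
            · rw [if_pos ⟨hq.1, hq.2, hlt⟩, if_pos ⟨hq.1, hq.2, by omega⟩]
            · rw [if_neg (by tauto), if_neg (by tauto)]
          · -- i < j : either j ≥ i + lowb i (cond false both) or in gap (not qual)
            have hij : i < j := by omega
            by_cases hbig : j < i + lowb i
            · have := lowb_gap i j (by omega) hij hbig
              rw [if_neg (by omega), if_neg (by omega)]
            · rw [if_neg (by omega), if_neg (by omega)]
      · omega
    · rw [show fenAdd (n : Int) B (i : Int) v (fuel + 1) = B by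
        rw [fenAdd]; rw [if_neg (by exact_mod_cast hin)]]
      refine ⟨hlen, ?_⟩
      intro j hj1 hj2
      rw [hinv j hj1 hj2]
      by_cases hq : x ≤ j ∧ j - lowb j < x
      · rw [if_pos ⟨hq.1, hq.2, by omega⟩, if_pos hq]
      · rw [if_neg (by tauto), if_neg hq]

theorem pref_mono (c : Nat → Int) (hc : ∀ t, 0 ≤ c t) : ∀ p q : Nat, p ≤ q → pref c p ≤ pref c q := by
  intro p q h
  induction q with
  | zero => simp_all
  | succ q ih =>
    rcases Nat.lt_or_ge p (q + 1) with h1 | h1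
    · have := ih (by omega)
      have := hc (q + 1)
      rw [pref]
      omega
    · have : p = q + 1 := by omega
      rw [this]

theorem shift_pow_succ (e : Nat) : ((2 ^ (e + 1) : Nat) : Int) >>> (1 : Nat) = ((2 ^ e : Nat) : Int) := by
  rw [Int.shiftRight_eq_div_pow]
  push_cast [pow_succ]
  omega

theorem pick_loop (n : Nat) (c : Nat → Int) (bit : List Int)
    (hbit : ∀ j : Nat, 1 ≤ j → j ≤ n → bit.getD j 0 = ideal c j)
    (hmono : ∀ p q : Nat, p ≤ q → pref c p ≤ pref c q)
    (k : Int) (a : Nat) (ha0 : 1 ≤ a) (han : a ≤ n)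
    (hka : k ≤ pref c a) (hka2 : pref c (a - 1) < k) :
    ∀ e : Nat, ∀ fuel : Nat, e + 2 ≤ fuel → ∀ i : Nat, ∀ k' : Int,
    2 ^ (e + 1) ∣ i → i < a → a ≤ i + 2 ^ (e + 1) → k' = k - pref c i →
    fenPickLoop (n : Int) bit (i : Int) k' ((2 ^ e : Nat) : Int) fuel = ((a - 1 : Nat) : Int) := by
  intro e
  induction e with
  | zero =>
    intro fuel hfuel i k' hdvd hia hai hk'
    obtain ⟨f, rfl⟩ : ∃ f, fuel = f + 2 := ⟨fuel - 2, by omega⟩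
    rw [fenPickLoop]
    rw [if_pos (by norm_num)]
    have hcast : (i : Int) + ((2 ^ 0 : Nat) : Int) = ((i + 1 : Nat) : Int) := by push_cast; ring
    simp only [hcast]
    have hlb : lowb (i + 1) = 1 := by
      have := lowb_add_pow 0 i (by simpa using hdvd)
      simpa using this
    have hbv : PySem.List.pyGetD bit ((i + 1 : Nat) : Int) 0 = pref c (i + 1) - pref c i := by
      rw [PySem.List.pyGetD_natCast]
      rw [hbit (i + 1) (by omega) (by omega)]
      unfold ideal
      rw [hlb]
      simp
    rcases Nat.eq_or_lt_of_le (show i + 1 ≤ a by omega) with hae | hae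
    · -- a = i + 1 : do not move
      have hge : k ≤ pref c (i + 1) := by rw [hae]; exact hka
      rw [if_neg (by
        rw [hbv]
        push_cast
        intro hcon
        omega)]
      rw [show ((2 ^ 0 : Nat) : Int) >>> (1 : Nat) = 0 by decide]
      rw [fenPickLoop]
      rw [if_neg (by norm_num)]
      congr 1
      omega
    · -- a = i + 2 : move
      have hae2 : a = i + 2 := by omega
      have hlt : pref c (i + 1) < k := by
        have : i + 1 = a - 1 := by omega
        rw [this]; exact hka2
      rw [if_pos (by
        constructor
        · exact_mod_cast Nat.le_of_lt_succ (by omega : i + 1 < n + 1)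
        · rw [hbv]; omega)]
      rw [show ((2 ^ 0 : Nat) : Int) >>> (1 : Nat) = 0 by decide]
      rw [fenPickLoop]
      rw [if_neg (by norm_num)]
      congr 1
      omega
  | succ e ih =>
    intro fuel hfuel i k' hdvd hia hai hk'
    obtain ⟨f, rfl⟩ : ∃ f, fuel = f + 1 := ⟨fuel - 1, by omega⟩
    rw [fenPickLoop]
    rw [if_pos (show ((2 ^ (e+1) : Nat) : Int) ≠ 0 from Nat.cast_ne_zero.mpr (by positivity))]
    have hcast : (i : Int) + ((2 ^ (e + 1) : Nat) : Int) = ((i + 2 ^ (e + 1) : Nat) : Int) := by push_cast; ring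
    simp only [hcast, shift_pow_succ]
    by_cases hc1 : i + 2 ^ (e + 1) ≤ n
    · have hlb : lowb (i + 2 ^ (e + 1)) = 2 ^ (e + 1) := lowb_add_pow (e + 1) i hdvd
      have hbv : PySem.List.pyGetD bit ((i + 2 ^ (e + 1) : Nat) : Int) 0
          = pref c (i + 2 ^ (e + 1)) - pref c i := by
        rw [PySem.List.pyGetD_natCast]
        rw [hbit _ (by have h9 : 0 < 2 ^ (e+1) := by positivity
                       omega) hc1]
        unfold ideal
        rw [hlb]
        simp
      by_cases hc2 : pref c (i + 2 ^ (e + 1)) < k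
      · -- move
        have hlt : i + 2 ^ (e + 1) < a := by
          by_contra hcon
          have := hmono a (i + 2 ^ (e + 1)) (by omega)
          omega
        rw [if_pos (by exact ⟨by exact_mod_cast hc1, by rw [hbv]; omega⟩)]
        apply ih f (by omega) (i + 2 ^ (e + 1)) _ (by
          obtain ⟨q, hq⟩ := hdvd
          exact ⟨2 * q + 1, by rw [hq]; ring⟩) hlt (by
          have : a ≤ i + 2 ^ (e + 1 + 1) := hai
          rw [pow_succ] at this
          omega) (by rw [hbv]; omega)
      · -- stay
        have hle : a ≤ i + 2 ^ (e + 1) := by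
          by_contra hcon
          have := hmono (i + 2 ^ (e + 1)) (a - 1) (by omega)
          omega
        rw [if_neg (by rw [hbv]; intro hcon; omega)]
        apply ih f (by omega) i _ (dvd_trans ⟨2, by ring⟩ hdvd) hia hle hk'
    · -- nxt > n : stay
      rw [if_neg (by
        intro hcon
        have : (↑(i + 2 ^ (e + 1)) : Int) ≤ (n : Int) := hcon.1
        have : i + 2 ^ (e + 1) ≤ n := by exact_mod_cast this
        omega)]
      apply ih f (by omega) i _ (dvd_trans ⟨2, by ring⟩ hdvd) hia (by omega) hk'

theorem fenPick_correct (n : Nat) (hn : 1 ≤ n) (c : Nat → Int) (bit : List Int)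
    (hbit : ∀ j : Nat, 1 ≤ j → j ≤ n → bit.getD j 0 = ideal c j)
    (hmono : ∀ p q : Nat, p ≤ q → pref c p ≤ pref c q)
    (k : Int) (a : Nat) (ha0 : 1 ≤ a) (han : a ≤ n)
    (hka : k ≤ pref c a) (hka2 : pref c (a - 1) < k) :
    fenPick (n : Int) bit k = (a : Int) := by
  unfold fenPick
  have hL1 : 1 ≤ PySem.Int.bitLength (n : Int) := by
    by_contra h
    have h2 := PySem.Int.lt_two_pow_bitLength (n : Int)
    have h3 : PySem.Int.bitLength (n : Int) = 0 := by omega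
    rw [h3] at h2
    simp at h2
    omega
  have hstep : (1 : Int) <<< (PySem.Int.bitLength (n : Int) - 1)
      = ((2 ^ (PySem.Int.bitLength (n : Int) - 1) : Nat) : Int) := by
    rw [Int.shiftLeft_eq]; push_cast; ring
  have h2 := PySem.Int.lt_two_pow_bitLength (n : Int)
  rw [Int.natAbs_natCast] at h2
  have hsucc : PySem.Int.bitLength (n : Int) - 1 + 1 = PySem.Int.bitLength (n : Int) := by omega
  rw [hstep]
  rw [show (0 : Int) = ((0 : Nat) : Int) by norm_num]
  rw [pick_loop n c bit hbit hmono k a ha0 han hka hka2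
    (PySem.Int.bitLength (n : Int) - 1) (PySem.Int.bitLength (n : Int) + 1) (by omega)
    0 k (Dvd.intro 0 rfl) (by omega) (by rw [hsucc]; omega) (by rw [show pref c 0 = 0 from rfl]; ring)]
  omega

def cS (S : List Int) : Nat → Int := fun t => if (t : Int) ∈ S then 1 else 0

theorem countP_le_succ (S : List Int) (hnd : S.Nodup) (m : Int) :
    S.countP (fun x => decide (x ≤ m + 1)) =
      S.countP (fun x => decide (x ≤ m)) + (if (m + 1) ∈ S then 1 else 0) := by
  induction S with
  | nil => simp
  | cons x t ih =>
    rw [List.nodup_cons] at hnd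
    rw [List.countP_cons, List.countP_cons, ih hnd.2]
    simp only [List.mem_cons]
    by_cases h4 : x = m + 1
    · have hnt : (m + 1) ∉ t := h4 ▸ hnd.1
      simp [h4, hnt]
    · simp [decide_eq_true_eq, (show ¬ (m + 1 = x) from fun h => h4 h.symm)]
      split_ifs <;> omega

theorem pref_cS (S : List Int) (hnd : S.Nodup) (h1 : ∀ x ∈ S, 1 ≤ x) :
    ∀ m : Nat, pref (cS S) m = (S.countP (fun x => decide (x ≤ (m : Int))) : Int) := by
  intro m
  induction m with
  | zero =>
    rw [pref]
    rw [List.countP_eq_zero.mpr (by intro x hx; simpa using by have := h1 x hx; omega)]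
    simp
  | succ m ih =>
    rw [pref, ih, cS]
    push_cast
    rw [countP_le_succ S hnd (m : Int)]
    by_cases hm : ((m : Int) + 1) ∈ S
    · rw [if_pos hm, if_pos hm]; push_cast; ring
    · rw [if_neg hm, if_neg hm]; push_cast; ring


theorem nodup_of_pairwise_lt (S : List Int) (h : S.Pairwise (· < ·)) : S.Nodup :=
  h.imp (fun hl => ne_of_lt hl)

theorem target_ge (S : List Int) (hp : S.Pairwise (· < ·)) (h1 : ∀ x ∈ S, 1 ≤ x)
    (j : Nat) (hj : j < S.length) :
    (j : Int) + 1 ≤ pref (cS S) (S[j].toNat) := by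
  have ha1 : 1 ≤ S[j] := h1 _ (List.getElem_mem hj)
  have hcast : ((S[j].toNat : Nat) : Int) = S[j] := by omega
  rw [pref_cS S (nodup_of_pairwise_lt S hp) h1, hcast]
  generalize hv : S[j] = v at *
  have hsplit := List.take_append_drop (j + 1) S
  have hcount : S.countP (fun x => decide (x ≤ v)) =
      (S.take (j + 1)).countP (fun x => decide (x ≤ v))
      + (S.drop (j + 1)).countP (fun x => decide (x ≤ v)) := by
    conv_lhs => rw [← hsplit]
    exact List.countP_append
  have hlen : (S.take (j + 1)).length = j + 1 := by
    rw [List.length_take]; omega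
  have htake : (S.take (j + 1)).countP (fun x => decide (x ≤ v)) = (S.take (j + 1)).length := by
    apply List.countP_eq_length.mpr
    intro x hx
    rw [List.mem_iff_getElem] at hx
    obtain ⟨i, hi, rfl⟩ := hx
    rw [List.getElem_take]
    have hij : i < j + 1 := by rw [hlen] at hi; omega
    rcases Nat.lt_or_ge i j with h | h
    · have := List.pairwise_iff_getElem.mp hp i j (by omega) hj h
      rw [hv] at this
      simp; omega
    · have hieq : i = j := by omega
      subst hieq
      simp [hv]
  omega

theorem target_lt (S : List Int) (hp : S.Pairwise (· < ·)) (h1 : ∀ x ∈ S, 1 ≤ x)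
    (j : Nat) (hj : j < S.length) :
    pref (cS S) (S[j].toNat - 1) < (j : Int) + 1 := by
  have ha1 : 1 ≤ S[j] := h1 _ (List.getElem_mem hj)
  have hcast : ((S[j].toNat - 1 : Nat) : Int) = S[j] - 1 := by omega
  rw [pref_cS S (nodup_of_pairwise_lt S hp) h1, hcast]
  generalize hv : S[j] = v at *
  have hsplit := List.take_append_drop j S
  have hcount : S.countP (fun x => decide (x ≤ v - 1)) =
      (S.take j).countP (fun x => decide (x ≤ v - 1))
      + (S.drop j).countP (fun x => decide (x ≤ v - 1)) := by
    conv_lhs => rw [← hsplit]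
    exact List.countP_append
  have hdrop : (S.drop j).countP (fun x => decide (x ≤ v - 1)) = 0 := by
    apply List.countP_eq_zero.mpr
    intro x hx
    rw [List.mem_iff_getElem] at hx
    obtain ⟨i, hi, rfl⟩ := hx
    rw [List.getElem_drop]
    rcases Nat.eq_zero_or_pos i with h0 | h0
    · subst h0
      simp only [Nat.add_zero]
      simp
      omega
    · have := List.pairwise_iff_getElem.mp hp j (j + i) hj (by rw [List.length_drop] at hi; omega) (by omega)
      rw [hv] at this
      simp; omega
  have htake : (S.take j).countP (fun x => decide (x ≤ v - 1)) ≤ j := by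
    calc (S.take j).countP _ ≤ (S.take j).length := List.countP_le_length
    _ ≤ j := by rw [List.length_take]; omega
  omega

theorem cS_eraseIdx (S : List Int) (hp : S.Pairwise (· < ·)) (h1 : ∀ x ∈ S, 1 ≤ x)
    (j : Nat) (hj : j < S.length) :
    cS (S.eraseIdx j) = updf (cS S) (S[j].toNat) (-1) := by
  have hnd := nodup_of_pairwise_lt S hp
  have ha1 : 1 ≤ S[j] := h1 _ (List.getElem_mem hj)
  have hdropj : S[j] :: S.drop (j + 1) = S.drop j := List.getElem_cons_drop hj
  have hsplit : S = S.take j ++ S[j] :: S.drop (j + 1) := by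
    rw [hdropj, List.take_append_drop]
  have hnd2 : (S.take j ++ S[j] :: S.drop (j + 1)).Nodup := by rw [← hsplit]; exact hnd
  rw [List.nodup_append] at hnd2
  have hnotake : S[j] ∉ S.take j := fun hmem => hnd2.2.2 _ hmem _ (List.mem_cons_self ..) rfl
  have hnodrop : S[j] ∉ S.drop (j + 1) := by
    have h9 := hnd2.2.1
    rw [List.nodup_cons] at h9
    exact h9.1
  funext t
  simp only [cS, updf]
  rw [List.eraseIdx_eq_take_drop_succ]
  by_cases ht : (t : Int) = S[j]
  · have htx : t = S[j].toNat := by omega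
    have hmemS : (t : Int) ∈ S := by rw [ht]; exact List.getElem_mem hj
    rw [if_pos htx, if_pos hmemS]
    rw [if_neg (by
      rw [List.mem_append, ht]
      push Not
      exact ⟨hnotake, hnodrop⟩)]
    norm_num
  · have htx : t ≠ S[j].toNat := by omega
    rw [if_neg htx]
    have hmem : ((t : Int) ∈ S.take j ++ S.drop (j + 1)) ↔ ((t : Int) ∈ S) := by
      conv_rhs => rw [hsplit]
      rw [List.mem_append, List.mem_append, List.mem_cons]
      tauto
    rw [if_congr hmem rfl rfl]


theorem cS_nonneg (S : List Int) : ∀ t, 0 ≤ cS S t := by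
  intro t
  rw [cS]
  split_ifs <;> omega

theorem pref_of_zero (c : Nat → Int) (h : ∀ t, 1 ≤ t → c t = 0) : ∀ m, pref c m = 0 := by
  intro m
  induction m with
  | zero => rfl
  | succ m ih => rw [pref, ih, h (m + 1) (by omega)]; ring

def indm (m : Nat) : Nat → Int := fun t => if 1 ≤ t ∧ t ≤ m then 1 else 0

theorem updf_indm (m : Nat) : updf (indm m) (m + 1) 1 = indm (m + 1) := by
  funext t
  rw [updf, indm, indm]
  by_cases h : t = m + 1
  · subst h
    rw [if_pos rfl, if_neg (by omega), if_pos (by omega)]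
    ring
  · rw [if_neg h]
    by_cases h2 : 1 ≤ t ∧ t ≤ m
    · rw [if_pos h2, if_pos (by omega)]
    · rw [if_neg h2, if_neg (by omega)]

theorem indm_eq_cS (n : Nat) : indm n = cS (PySem.List.pyRange 1 ((n : Int) + 1) 1) := by
  funext t
  rw [indm, cS]
  by_cases h : (t : Int) ∈ PySem.List.pyRange 1 ((n : Int) + 1) 1
  · rw [if_pos h]
    rw [PySem.List.mem_pyRange_one] at h
    rw [if_pos (by omega)]
  · rw [if_neg h]
    rw [PySem.List.mem_pyRange_one] at h
    rw [if_neg (by omega)]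

theorem build_rep (n : Nat) :
    ∀ m : Nat, m ≤ n →
    (((PySem.List.pyRange 1 ((m : Int) + 1) 1).foldl
        (fun b number => fenAdd ((n : Nat) : Int) b number 1 (((n : Nat) : Int) + 1 - number).toNat)
        (List.replicate (n + 1) 0)).length = n + 1
     ∧ ∀ j : Nat, 1 ≤ j → j ≤ n →
        ((PySem.List.pyRange 1 ((m : Int) + 1) 1).foldl
          (fun b number => fenAdd ((n : Nat) : Int) b number 1 (((n : Nat) : Int) + 1 - number).toNat)
          (List.replicate (n + 1) 0)).getD j 0 = ideal (indm m) j) := by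
  intro m
  induction m with
  | zero =>
    intro _
    rw [show ((0 : Nat) : Int) + 1 = 1 by norm_num]
    rw [PySem.List.pyRange_one_eq_nil (by omega)]
    simp only [List.foldl_nil]
    refine ⟨by simp, ?_⟩
    intro j h1 h2
    rw [List.getD_replicate 0 (by omega)]
    rw [ideal]
    rw [pref_of_zero (indm 0) (by intro t ht; rw [indm]; rw [if_neg (by omega)]),
        pref_of_zero (indm 0) (by intro t ht; rw [indm]; rw [if_neg (by omega)])]
    ring
  | succ m ih =>
    intro hm
    obtain ⟨ihlen, ihval⟩ := ih (by omega)
    rw [show (((m + 1 : Nat)) : Int) + 1 = ((m : Int) + 1) + 1 by push_cast; ring]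
    rw [PySem.List.pyRange_one_succ_right (a := 1) (b := (m : Int) + 1) (by omega)]
    rw [List.foldl_append]
    simp only [List.foldl_cons, List.foldl_nil]
    rw [show ((((n : Nat)) : Int) + 1 - ((m : Int) + 1)).toNat = n - m by omega]
    have hwalk := fenAdd_walk n (m + 1) (by omega) 1 (indm m) (n - m) (m + 1) _
      (by omega) (by omega) (by have := lowb_pos (m + 1) (by omega); omega)
      ihlen
      (by
        intro j h1 h2
        rw [if_neg (by omega)]
        exact ihval j h1 h2)
      (by omega)
    push_cast at hwalk
    refine ⟨hwalk.1, ?_⟩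
    intro j h1 h2
    rw [hwalk.2 j h1 h2]
    rw [← updf_indm m]
    by_cases hq : m + 1 ≤ j ∧ j - lowb j < m + 1
    · rw [if_pos hq]
    · rw [if_neg hq]
      rw [ideal_upd (indm m) (m + 1) 1 (by omega) j h1]
      rw [if_neg hq]
      ring

theorem main_loop (n : Nat) (hn1 : 1 ≤ n) (before : List Int)
    (hbef : ∀ p : Nat, p < n → 0 ≤ before.getD p 0 ∧ before.getD p 0 ≤ (p : Int)) :
    ∀ (pos : Nat), pos < n → ∀ (S bit ans : List Int),
    S.Pairwise (· < ·) →
    (∀ x ∈ S, 1 ≤ x ∧ x ≤ (n : Int)) →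
    S.length = pos + 1 →
    bit.length = n + 1 →
    (∀ j : Nat, 1 ≤ j → j ≤ n → bit.getD j 0 = ideal (cS S) j) →
    ((PySem.List.pyRange ((pos : Nat) : Int) (-1) (-1)).foldl
        (fun (s : List Int × List Int) pos =>
          let a := fenPick ((n : Nat) : Int) s.1 (PySem.List.pyGetD before pos 0 + 1)
          (fenAdd ((n : Nat) : Int) s.1 a (-1) (((n : Nat) : Int) + 1 - a).toNat,
           PySem.List.pySetD s.2 pos a))
        (bit, ans)).2
    = ((PySem.List.pyRange ((pos : Nat) : Int) (-1) (-1)).foldl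
        (fun (s : List Int × List Int) pos =>
          match PySem.List.pop? s.1 (PySem.List.pyGetD before pos 0) with
          | some (a, rest) => (rest, PySem.List.pySetD s.2 pos a)
          | none => s)
        (S, ans)).2 := by
  intro pos
  induction pos using Nat.strong_induction_on with
  | _ pos ihpos =>
    intro hposn S bit ans hp hmem hSlen hblen hbit
    rw [PySem.List.pyRange_neg_one_cons (by omega : (-1 : Int) < (pos : Int))]
    rw [List.foldl_cons, List.foldl_cons]
    -- the index popped this step
    have hb := hbef pos hposn
    rw [PySem.List.pyGetD_natCast]
    set b : Int := before.getD pos 0 with hbdef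
    have hj : b.toNat < S.length := by omega
    have hbj : (b.toNat : Int) = b := by omega
    have hmemJ := hmem S[b.toNat] (List.getElem_mem hj)
    have haN1 : 1 ≤ S[b.toNat].toNat := by omega
    have haNn : S[b.toNat].toNat ≤ n := by omega
    have haC : ((S[b.toNat].toNat : Nat) : Int) = S[b.toNat] := by omega
    have hmem1 : ∀ x ∈ S, 1 ≤ x := fun x hx => (hmem x hx).1
    -- A picks exactly S[b.toNat]
    have hpick : fenPick ((n : Nat) : Int) bit (b + 1) = S[b.toNat] := by
      rw [← haC]
      apply fenPick_correct n hn1 (cS S) bit hbit (pref_mono (cS S) (cS_nonneg S))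
        (b + 1) (S[b.toNat].toNat) haN1 haNn
      · have h9 := target_ge S hp hmem1 b.toNat hj
        rw [hbj] at h9
        exact h9
      · have h9 := target_lt S hp hmem1 b.toNat hj
        rw [hbj] at h9
        exact h9
    -- B pops the same element
    have hpop : PySem.List.pop? S b = some (S[b.toNat], S.eraseIdx b.toNat) := by
      conv_lhs => rw [← hbj]
      exact PySem.List.pop?_natCast S b.toNat hj
    rw [hpick, hpop]
    -- the updated Fenwick array represents the erased list
    have hwalk := fenAdd_walk n (S[b.toNat].toNat) haN1 (-1) (cS S)
      ((((n : Nat) : Int) + 1 - S[b.toNat]).toNat) (S[b.toNat].toNat) bit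
      (by omega) (by omega)
      (by have := lowb_pos (S[b.toNat].toNat) (by omega); omega)
      hblen
      (by
        intro j h1 h2
        rw [if_neg (by omega)]
        exact hbit j h1 h2)
      (by omega)
    rw [haC] at hwalk
    have hbit' : ∀ j : Nat, 1 ≤ j → j ≤ n →
        (fenAdd ((n : Nat) : Int) bit S[b.toNat] (-1) ((((n : Nat) : Int) + 1 - S[b.toNat]).toNat)).getD j 0
          = ideal (cS (S.eraseIdx b.toNat)) j := by
      intro j h1 h2
      rw [hwalk.2 j h1 h2, cS_eraseIdx S hp hmem1 b.toNat hj]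
      by_cases hq : S[b.toNat].toNat ≤ j ∧ j - lowb j < S[b.toNat].toNat
      · rw [if_pos hq]
      · rw [if_neg hq, ideal_upd (cS S) (S[b.toNat].toNat) (-1) haN1 j h1, if_neg hq]
        ring
    have hS' : (S.eraseIdx b.toNat).Pairwise (· < ·) := List.Pairwise.sublist (List.eraseIdx_sublist S b.toNat) hp
    have hmem' : ∀ x ∈ S.eraseIdx b.toNat, 1 ≤ x ∧ x ≤ (n : Int) :=
      fun x hx => hmem x ((List.eraseIdx_sublist S b.toNat).subset hx)
    have hlen' : (S.eraseIdx b.toNat).length = pos := by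
      rw [List.length_eraseIdx]
      rw [if_pos hj]
      omega
    rcases Nat.eq_zero_or_pos pos with h0 | h0
    · subst h0
      rw [show ((0 : Nat) : Int) - 1 = -1 by norm_num]
      rw [PySem.List.pyRange_neg_one_eq_nil (by omega)]
      simp
    · obtain ⟨p, rfl⟩ : ∃ p, pos = p + 1 := ⟨pos - 1, by omega⟩
      rw [show (((p + 1 : Nat)) : Int) - 1 = ((p : Nat) : Int) by push_cast; ring]
      exact ihpos p (by omega) (by omega) (S.eraseIdx b.toNat) _ _ hS' hmem' (by omega) hwalk.1 hbit'


theorem core (n : Int) (before : List Int)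
    (hbef : ∀ p : Nat, (p : Int) < n → 0 ≤ before.getD p 0 ∧ before.getD p 0 ≤ (p : Int)) :
    PySem.Str.join "\n" ((((PySem.List.pyRange (n - 1) (-1) (-1)).foldl
        (fun (s : List Int × List Int) pos =>
          let a := fenPick n s.1 (PySem.List.pyGetD before pos 0 + 1)
          (fenAdd n s.1 a (-1) (n + 1 - a).toNat, PySem.List.pySetD s.2 pos a))
        ((PySem.List.pyRange 1 (n + 1) 1).foldl
            (fun b number => fenAdd n b number 1 (n + 1 - number).toNat)
            (List.replicate (n + 1).toNat 0),
         List.replicate n.toNat 0)).2).map PySem.Int.toStr)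
    = PySem.Str.join "\n" ((((PySem.List.pyRange (n - 1) (-1) (-1)).foldl
        (fun (s : List Int × List Int) pos =>
          match PySem.List.pop? s.1 (PySem.List.pyGetD before pos 0) with
          | some (a, rest) => (rest, PySem.List.pySetD s.2 pos a)
          | none => s)
        (PySem.List.pyRange 1 (n + 1) 1, List.replicate n.toNat 0)).2).map PySem.Int.toStr) := by
  by_cases hn : n ≤ 0
  · rw [PySem.List.pyRange_neg_one_eq_nil (by omega : n - 1 ≤ (-1 : Int))]
    rfl
  · obtain ⟨nN, rfl⟩ : ∃ m : Nat, n = (m : Int) := ⟨n.toNat, by omega⟩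
    have hnN : 1 ≤ nN := by omega
    have hbef' : ∀ p : Nat, p < nN → 0 ≤ before.getD p 0 ∧ before.getD p 0 ≤ (p : Int) := by
      intro p hp
      exact hbef p (by omega)
    congr 1
    congr 1
    -- initial Fenwick array represents {1..n}
    rw [show (((nN : Nat) : Int) + 1).toNat = nN + 1 by omega]
    have hbuild := build_rep nN nN le_rfl
    have hS0p := PySem.List.pairwise_lt_pyRange_one 1 (((nN : Nat) : Int) + 1)
    have hS0m : ∀ x ∈ PySem.List.pyRange 1 (((nN : Nat) : Int) + 1) 1, 1 ≤ x ∧ x ≤ ((nN : Nat) : Int) := by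
      intro x hx
      rw [PySem.List.mem_pyRange_one] at hx
      omega
    have hS0l : (PySem.List.pyRange 1 (((nN : Nat) : Int) + 1) 1).length = (nN - 1) + 1 := by
      rw [PySem.List.length_pyRange_one]
      omega
    rw [show ((nN : Nat) : Int) - 1 = (((nN - 1 : Nat)) : Int) by omega]
    apply main_loop nN hnN before hbef' (nN - 1) (by omega) _ _ _ hS0p hS0m hS0l hbuild.1
    intro j h1 h2
    rw [hbuild.2 j h1 h2, indm_eq_cS]

-- ===== VERDICT (by name: the statement is the Claim_ definition above) =====
theorem solve_spec : Claim_equal_solve := by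
  intro data _ hpre
  unfold Spec_solve
  unfold Pre_solve at hpre
  show solve data = solve_alt data
  unfold solve solve_alt
  by_cases hnil : PySem.Str.split₀ data = []
  · rw [if_pos hnil, if_pos hnil]
  · rw [if_neg hnil, if_neg hnil]
    apply core
    intro p hp
    replace hpre := hpre hnil
    obtain ⟨hsome, hrest⟩ := hpre
    set nE := (PySem.Int.ofStr? ((PySem.Str.split₀ data).getD 0 "")).getD 0 with hnE
    obtain ⟨hlen, hall⟩ := hrest (by
      have h0 : (0 : Int) ≤ (p : Int) := by positivity
      omega)
    cases p with
    | zero => simp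
    | succ q =>
      rw [List.getD_cons_succ]
      have hq : q < (nE - 1).toNat := by
        have h9 : ((q + 1 : Nat) : Int) < nE := hp
        omega
      have hall' := hall q hq
      have hplen : q + 1 < (PySem.Str.split₀ data).length := by omega
      rw [show (1 + max 0 (nE - 1)) = nE by omega]
      rw [PySem.List.slice_toNat _ (by omega) (by omega)]
      have hlen2 : q < ((List.take (nE.toNat - (1 : Int).toNat)
          (List.drop (1 : Int).toNat (PySem.Str.split₀ data))).map
          (fun x => (PySem.Int.ofStr? x).getD 0)).length := by
        simp only [List.length_map, List.length_take, List.length_drop]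
        omega
      rw [List.getD_eq_getElem _ 0 hlen2, List.getElem_map, List.getElem_take, List.getElem_drop]
      have hgd : (PySem.Str.split₀ data).getD (q + 1) "" = (PySem.Str.split₀ data)[q + 1] :=
        List.getD_eq_getElem _ _ hplen
      rw [hgd] at hall'
      have hidx : (1 : Int).toNat + q = q + 1 := by omega
      simp only [hidx]
      refine ⟨hall'.2.1, ?_⟩
      have h9 := hall'.2.2
      push_cast
      omega
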